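-- pv_equiv track=rewrite | github.com/vengaer/scc | scripts/python/snipgen.py | required_headers
-- ===== SOURCE A (Python) =====
-- def required_headers(snip, syms):
--     ''' Generate a set of headers to include '''
--     headers = set()
--     lines = snip.split('\n')
--     for header in syms:
--         for func in syms[header]:
--             for line in lines:
--                 if f'{func}(' in line:
--                     headers.add(header)
--                     break
--     return headers
-- ===== SOURCE B (Python) =====
-- def required_headers(snip, syms):
--     ''' Generate a set of headers to include '''
--     # Text-driven single scan: walk the snippet once keeping the current line
--     # accumulated so far; only at each '(' test which function names end the
--     # current line (a match of f'{func}(' in a line is exactly a '(' whose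
--     # current-line prefix ends with func).  Then pick the headers owning a
--     # matched function.
--     funcs = [f for fs in syms.values() for f in fs]
--     matched = set()
--     line = ''
--     for c in snip:
--         if c == '\n':
--             line = ''
--         else:
--             if c == '(':
--                 for f in funcs:
--                     if line.endswith(f):
--                         matched.add(f)
--             line += c
--     return {h for h, fs in syms.items() if any(f in matched for f in fs)}
-- ===== Notes on version B (the rewrite author's own statement) =====
-- stated objective: faster
-- what changed: B replaces A's pattern-driven triple loop (every func substring-searched through every line of the split snippet) by a text-driven single scan: one pass over the snippet maintains the current line and, only at each '(' character, records every function name that is a suffix of the current line; headers are then selected by membership of their funcs in that matched set, so the snippet is traversed once and patterns are tested only at candidate '(' positions.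
import Mathlib
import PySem

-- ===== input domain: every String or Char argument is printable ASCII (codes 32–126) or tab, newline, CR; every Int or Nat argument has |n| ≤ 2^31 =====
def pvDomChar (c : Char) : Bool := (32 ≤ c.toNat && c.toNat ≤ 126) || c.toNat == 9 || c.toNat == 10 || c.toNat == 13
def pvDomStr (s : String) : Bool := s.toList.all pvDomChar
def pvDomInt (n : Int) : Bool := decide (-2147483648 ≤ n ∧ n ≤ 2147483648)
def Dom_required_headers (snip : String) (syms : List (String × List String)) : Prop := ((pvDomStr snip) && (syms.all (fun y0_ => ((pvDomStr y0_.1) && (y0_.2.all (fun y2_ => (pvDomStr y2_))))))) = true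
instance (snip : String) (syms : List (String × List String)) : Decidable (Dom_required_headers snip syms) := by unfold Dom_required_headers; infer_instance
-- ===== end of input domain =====

-- B (measurably faster) replaces A's pattern-driven triple loop (each func searched through each
-- line) by one left-to-right scan of the snippet that tests function names only at '(' characters
-- against the running current line; return value only (no mutation).

-- ===== PORT A =====
def required_headers (snip : String) (syms : List (String × List String)) : List String :=
  let d := PySem.Dict.ofList syms
  let lines := PySem.Chars.splitOn snip.toList ['\n']          -- snip.split('\n')
  d.keys.foldl (fun (headers : PySem.Set String) header =>     -- for header in syms:
    (d.getD header []).foldl (fun (headers : PySem.Set String) func =>   -- for func in syms[header]: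
      -- for line in lines: if f'{func}(' in line: add; break  ≡  add iff some line contains it
      if lines.any (fun line => PySem.Chars.isIn (func.toList ++ ['(']) line) then
        PySem.Set.add headers header
      else headers) headers) PySem.Set.empty

-- ===== PORT B =====
-- one scan step: on '\n' reset the current line; on '(' record every func that ends the
-- current line; always extend the current line (except at '\n')
def bScanStep (funcs : List String) (st : List Char × PySem.Set String) (c : Char) :
    List Char × PySem.Set String :=
  if c = '\n' then ([], st.2)
  else
    (st.1 ++ [c],
     if c = '(' then
       funcs.foldl (fun m f =>
         if PySem.Chars.endswith st.1 f.toList then PySem.Set.add m f else m) st.2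
     else st.2)

def required_headers_alt (snip : String) (syms : List (String × List String)) : List String :=
  let d := PySem.Dict.ofList syms
  let funcs := d.values.flatMap (fun fs => fs)                 -- [f for fs in syms.values() for f in fs]
  let matched := (snip.toList.foldl (bScanStep funcs) ([], PySem.Set.empty)).2
  PySem.Set.ofList
    ((d.items.filter (fun p => p.2.any (fun f => PySem.Set.contains matched f))).map Prod.fst)

-- ===== PRECONDITION & SPEC =====
def Spec_required_headers (snip : String) (syms : List (String × List String)) (out : List String) : Prop := out = required_headers_alt snip syms
instance (snip : String) (syms : List (String × List String)) (out : List String) : Decidable (Spec_required_headers snip syms out) := by unfold Spec_required_headers; infer_instance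

-- ===== CLAIM (what is proved, stated in full; the proofs are below) =====
def Claim_equal_required_headers : Prop := ∀ (snip : String) (syms : List (String × List String)), Dom_required_headers snip syms → Spec_required_headers snip syms (required_headers snip syms)

-- ===== LEMMAS AND PROOFS =====

-- the running current line: foldl of the line-update of bScanStep
def lineAcc (line : List Char) (s : List Char) : List Char :=
  s.foldl (fun l c => if c = '\n' then [] else l ++ [c]) line

lemma lineAcc_nil (line : List Char) : lineAcc line [] = line := rfl

lemma lineAcc_cons (line : List Char) (c : Char) (s : List Char) :
    lineAcc line (c :: s) = lineAcc (if c = '\n' then [] else line ++ [c]) s := rfl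

lemma lineAcc_append (line u v : List Char) :
    lineAcc line (u ++ v) = lineAcc (lineAcc line u) v := List.foldl_append

lemma newline_not_mem_lineAcc {line : List Char} (h : '\n' ∉ line) (s : List Char) :
    '\n' ∉ lineAcc line s := by
  induction s generalizing line with
  | nil => exact h
  | cons c s ih =>
    rw [lineAcc_cons]
    by_cases hc : c = '\n'
    · simp only [hc, if_pos rfl]; exact ih (by simp)
    · simp only [if_neg hc]
      exact ih (by
        intro hm
        rcases List.mem_append.1 hm with h1 | h1
        · exact h h1
        · simp at h1; exact hc h1.symm)

lemma lineAcc_suffix (line s : List Char) : lineAcc line s <:+ line ++ s := by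
  induction s generalizing line with
  | nil => simp [lineAcc_nil]
  | cons c s ih =>
    rw [lineAcc_cons]
    by_cases hc : c = '\n'
    · simp only [hc, if_pos rfl]
      exact (by simpa using ih [] : lineAcc [] s <:+ s).trans ⟨line ++ ['\n'], by simp⟩
    · simp only [if_neg hc]
      have := ih (line ++ [c])
      simpa using this
  -- note: the '\n' case needs lineAcc [] s <:+ s <:+ line ++ '\n' :: s

lemma lineAcc_no_newline (line t : List Char) (h : '\n' ∉ t) :
    lineAcc line t = line ++ t := by
  induction t generalizing line with
  | nil => simp [lineAcc_nil]
  | cons c t ih =>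
    have hc : c ≠ '\n' := fun hh => h (hh ▸ List.mem_cons_self)
    rw [lineAcc_cons, if_neg hc, ih _ (fun hm => h (List.mem_cons_of_mem _ hm))]
    simp

-- the inner update at a '(': membership after recording the funcs ending the line
lemma mem_record (funcs : List String) (line : List Char) (m : PySem.Set String) (f : String) :
    f ∈ funcs.foldl (fun m g =>
        if PySem.Chars.endswith line g.toList then PySem.Set.add m g else m) m
      ↔ f ∈ m ∨ (f ∈ funcs ∧ f.toList <:+ line) := by
  induction funcs generalizing m with
  | nil => simp
  | cons g gs ih =>
    simp only [List.foldl_cons]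
    by_cases hg : PySem.Chars.endswith line g.toList
    · rw [if_pos hg, ih]
      constructor
      · rintro (hm | hm)
        · rcases (PySem.Set.mem_add _ _ _).1 hm with h | h
          · exact Or.inl h
          · exact Or.inr ⟨by simp [h], h ▸ (PySem.Chars.endswith_iff _ _).1 hg⟩
        · exact Or.inr ⟨List.mem_cons_of_mem _ hm.1, hm.2⟩
      · rintro (hm | ⟨hmem, hsuf⟩)
        · exact Or.inl ((PySem.Set.mem_add _ _ _).2 (Or.inl hm))
        · rcases List.mem_cons.1 hmem with rfl | hmem
          · exact Or.inl ((PySem.Set.mem_add _ _ _).2 (Or.inr rfl))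
          · exact Or.inr ⟨hmem, hsuf⟩
    · rw [if_neg hg, ih]
      constructor
      · rintro (hm | hm)
        · exact Or.inl hm
        · exact Or.inr ⟨List.mem_cons_of_mem _ hm.1, hm.2⟩
      · rintro (hm | ⟨hmem, hsuf⟩)
        · exact Or.inl hm
        · rcases List.mem_cons.1 hmem with rfl | hmem
          · exact absurd ((PySem.Chars.endswith_iff _ _).2 hsuf) hg
          · exact Or.inr ⟨hmem, hsuf⟩

-- membership in the matched set after scanning s from state (line, m)
lemma scan_mem (funcs : List String) (s : List Char) (line : List Char)
    (m : PySem.Set String) (f : String) :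
    f ∈ (s.foldl (bScanStep funcs) (line, m)).2
      ↔ f ∈ m ∨ (f ∈ funcs ∧ ∃ u v, s = u ++ '(' :: v ∧ f.toList <:+ lineAcc line u) := by
  induction s generalizing line m with
  | nil =>
    simp only [List.foldl_nil]
    constructor
    · exact fun h => Or.inl h
    · rintro (h | ⟨_, u, v, huv, _⟩)
      · exact h
      · exact absurd huv (by simp)
  | cons c s ih =>
    rw [List.foldl_cons]
    by_cases hc : c = '\n'
    · subst hc
      simp only [bScanStep, if_pos rfl]
      rw [ih]
      apply or_congr Iff.rfl
      apply and_congr Iff.rfl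
      constructor
      · rintro ⟨u, v, rfl, hsuf⟩
        exact ⟨'\n' :: u, v, rfl, by simpa [lineAcc_cons] using hsuf⟩
      · rintro ⟨u, v, huv, hsuf⟩
        cases u with
        | nil => simp at huv
        | cons a u =>
          rcases List.cons_eq_cons.1 huv with ⟨rfl, rfl⟩
          exact ⟨u, v, rfl, by simpa [lineAcc_cons] using hsuf⟩
    · by_cases hp : c = '('
      · subst hp
        simp only [bScanStep, if_neg hc, if_pos rfl, if_true]
        rw [ih, mem_record]
        constructor
        · rintro ((hm | ⟨hmem, hsuf⟩) | ⟨hmem, u, v, rfl, hsuf⟩)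
          · exact Or.inl hm
          · exact Or.inr ⟨hmem, [], _, rfl, by simpa [lineAcc_nil] using hsuf⟩
          · exact Or.inr ⟨hmem, '(' :: u, v, rfl, by simpa [lineAcc_cons] using hsuf⟩
        · rintro (hm | ⟨hmem, u, v, huv, hsuf⟩)
          · exact Or.inl (Or.inl hm)
          · cases u with
            | nil =>
              rcases List.cons_eq_cons.1 huv with ⟨_, rfl⟩
              exact Or.inl (Or.inr ⟨hmem, by simpa [lineAcc_nil] using hsuf⟩)
            | cons a u =>
              rcases List.cons_eq_cons.1 huv with ⟨rfl, rfl⟩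
              exact Or.inr ⟨hmem, u, v, rfl, by simpa [lineAcc_cons] using hsuf⟩
      · simp only [bScanStep, if_neg hc, if_neg hp]
        rw [ih]
        apply or_congr Iff.rfl
        apply and_congr Iff.rfl
        constructor
        · rintro ⟨u, v, rfl, hsuf⟩
          exact ⟨c :: u, v, rfl, by simpa [lineAcc_cons, hc] using hsuf⟩
        · rintro ⟨u, v, huv, hsuf⟩
          cases u with
          | nil => rcases List.cons_eq_cons.1 huv with ⟨h1, _⟩; exact absurd h1 hp
          | cons a u =>
            rcases List.cons_eq_cons.1 huv with ⟨rfl, rfl⟩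
            exact ⟨u, v, rfl, by simpa [lineAcc_cons, hc] using hsuf⟩

-- ===== lemmas about A's per-line search (split at '\n') =====

lemma prefix_append_cons_of_not_mem {pat u v : List Char} {c : Char}
    (hc : c ∉ pat) (h : pat <+: u ++ c :: v) : pat <+: u := by
  induction u generalizing pat with
  | nil =>
    cases pat with
    | nil => exact List.nil_prefix
    | cons p ps =>
      rcases (List.cons_prefix_cons.1 h) with ⟨hp, _⟩
      exact absurd (hp ▸ List.mem_cons_self) hc
  | cons a u' ih =>
    cases pat with
    | nil => exact List.nil_prefix
    | cons p ps =>
      rcases (List.cons_prefix_cons.1 h) with ⟨hp, hps⟩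
      subst hp
      have hc' : c ∉ ps := fun hm => hc (List.mem_cons_of_mem _ hm)
      exact List.cons_prefix_cons.2 ⟨rfl, ih hc' hps⟩

lemma infix_append_cons_iff {pat u v : List Char} {c : Char} (hc : c ∉ pat) :
    pat <:+: u ++ c :: v ↔ (pat <:+: u ∨ pat <:+: v) := by
  constructor
  · intro h
    induction u with
    | nil =>
      rcases List.infix_cons_iff.1 h with hp | hi
      · exact Or.inl ((prefix_append_cons_of_not_mem (u := []) hc hp).isInfix)
      · exact Or.inr hi
    | cons a u' ih =>
      rcases List.infix_cons_iff.1 h with hp | hi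
      · exact Or.inl (prefix_append_cons_of_not_mem hc hp).isInfix
      · rcases ih hi with h1 | h2
        · exact Or.inl (h1.trans ((List.suffix_cons a u').isInfix))
        · exact Or.inr h2
  · rintro (h | h)
    · exact h.trans ⟨[], c :: v, by simp⟩
    · exact h.trans ⟨u ++ [c], [], by simp⟩

lemma isIn_append_sep {pat u v : List Char} {c : Char} (hc : c ∉ pat) :
    PySem.Chars.isIn pat (u ++ c :: v)
      = (PySem.Chars.isIn pat u || PySem.Chars.isIn pat v) := by
  by_cases h : pat <:+: u ++ c :: v
  · have := (infix_append_cons_iff hc).1 h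
    rcases this with h1 | h1
    · simp [(PySem.Chars.isIn_iff_infix _ _).2 h, (PySem.Chars.isIn_iff_infix _ _).2 h1]
    · simp [(PySem.Chars.isIn_iff_infix _ _).2 h, (PySem.Chars.isIn_iff_infix _ _).2 h1]
  · have h1 : ¬ pat <:+: u := fun hh => h ((infix_append_cons_iff hc).2 (Or.inl hh))
    have h2 : ¬ pat <:+: v := fun hh => h ((infix_append_cons_iff hc).2 (Or.inr hh))
    simp [(PySem.Chars.isIn_eq_false_iff _ _).2 h, (PySem.Chars.isIn_eq_false_iff _ _).2 h1,
      (PySem.Chars.isIn_eq_false_iff _ _).2 h2]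

lemma splitOn_go_zero (sep l cur : List Char) (acc : List (List Char)) :
    PySem.Chars.splitOn.go sep 0 l cur acc = ((cur.reverse ++ l) :: acc).reverse := rfl

lemma splitOn_go_succ_nil (sep cur : List Char) (fuel : Nat) (acc : List (List Char)) :
    PySem.Chars.splitOn.go sep (fuel + 1) [] cur acc = (cur.reverse :: acc).reverse := rfl

lemma splitOn_go_succ_cons (sep cur : List Char) (fuel : Nat) (c : Char) (rest : List Char)
    (acc : List (List Char)) :
    PySem.Chars.splitOn.go sep (fuel + 1) (c :: rest) cur acc
      = if sep.isPrefixOf (c :: rest) then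
          PySem.Chars.splitOn.go sep fuel (List.drop sep.length (c :: rest)) [] (cur.reverse :: acc)
        else PySem.Chars.splitOn.go sep fuel rest (c :: cur) acc := rfl

lemma go_any_isIn {pat : List Char} {c : Char} (hc : c ∉ pat) :
    ∀ (fuel : Nat) (l cur : List Char) (acc : List (List Char)), l.length ≤ fuel →
      (PySem.Chars.splitOn.go [c] fuel l cur acc).any (fun piece => PySem.Chars.isIn pat piece)
        = (acc.any (fun piece => PySem.Chars.isIn pat piece)
            || PySem.Chars.isIn pat (cur.reverse ++ l)) := by
  intro fuel
  induction fuel with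
  | zero =>
    intro l cur acc hl
    have : l = [] := List.length_eq_zero_iff.1 (Nat.le_zero.1 hl)
    subst this
    simp [splitOn_go_zero, Bool.or_comm]
  | succ fuel ih =>
    intro l cur acc hl
    cases l with
    | nil => simp [splitOn_go_succ_nil, Bool.or_comm]
    | cons a rest =>
      rw [splitOn_go_succ_cons]
      by_cases hac : c = a
      · subst hac
        have hpre : List.isPrefixOf [c] (c :: rest) = true := by simp [List.isPrefixOf]
        rw [if_pos hpre]
        simp only [List.length, List.drop]
        rw [ih rest [] (cur.reverse :: acc) (by simpa using Nat.lt_succ_iff.1 (by simpa using hl))]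
        simp [isIn_append_sep hc, Bool.or_comm, Bool.or_left_comm]
      · have hpre : List.isPrefixOf [c] (a :: rest) = false := by
          simp [List.isPrefixOf]; exact fun h => absurd h hac
        rw [if_neg (by simp [hpre])]
        rw [ih rest (a :: cur) acc (by simpa using Nat.lt_succ_iff.1 (by simpa using hl))]
        simp

lemma any_isIn_splitOn {pat s : List Char} {c : Char} (hc : c ∉ pat) :
    (PySem.Chars.splitOn s [c]).any (fun piece => PySem.Chars.isIn pat piece)
      = PySem.Chars.isIn pat s := by
  have : PySem.Chars.splitOn s [c] = PySem.Chars.splitOn.go [c] (s.length + 1) s [] [] := rfl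
  rw [this, go_any_isIn hc _ _ _ _ (Nat.le_succ _)]
  simp

lemma go_pieces_not_mem {c : Char} :
    ∀ (fuel : Nat) (l cur : List Char) (acc : List (List Char)), l.length ≤ fuel →
      c ∉ cur → (∀ p ∈ acc, c ∉ p) →
      ∀ p ∈ PySem.Chars.splitOn.go [c] fuel l cur acc, c ∉ p := by
  intro fuel
  induction fuel with
  | zero =>
    intro l cur acc hl hcur hacc p hp
    have : l = [] := List.length_eq_zero_iff.1 (Nat.le_zero.1 hl)
    subst this
    rw [splitOn_go_zero] at hp
    simp only [List.mem_reverse, List.mem_cons] at hp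
    rcases hp with rfl | hp
    · simpa using hcur
    · exact hacc _ hp
  | succ fuel ih =>
    intro l cur acc hl hcur hacc p hp
    cases l with
    | nil =>
      rw [splitOn_go_succ_nil] at hp
      simp only [List.mem_reverse, List.mem_cons] at hp
      rcases hp with rfl | hp
      · simpa using hcur
      · exact hacc _ hp
    | cons a rest =>
      rw [splitOn_go_succ_cons] at hp
      by_cases hac : c = a
      · subst hac
        rw [if_pos (by simp [List.isPrefixOf])] at hp
        simp only [List.length, List.drop] at hp
        refine ih rest [] (cur.reverse :: acc)
          (by simpa using Nat.lt_succ_iff.1 (by simpa using hl))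
          (by simp) ?_ p hp
        intro q hq
        rcases List.mem_cons.1 hq with rfl | hq
        · simpa using hcur
        · exact hacc _ hq
      · rw [if_neg (by simp [List.isPrefixOf]; exact fun h => absurd h hac)] at hp
        refine ih rest (a :: cur) acc
          (by simpa using Nat.lt_succ_iff.1 (by simpa using hl))
          ?_ hacc p hp
        intro hm
        rcases List.mem_cons.1 hm with rfl | hm
        · exact hac rfl
        · exact hcur hm

lemma any_isIn_splitOn_of_mem {pat s : List Char} {c : Char} (hc : c ∈ pat) :
    (PySem.Chars.splitOn s [c]).any (fun piece => PySem.Chars.isIn pat piece) = false := by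
  rw [List.any_eq_false]
  intro piece hpiece
  have hfree : c ∉ piece := by
    have : PySem.Chars.splitOn s [c] = PySem.Chars.splitOn.go [c] (s.length + 1) s [] [] := rfl
    rw [this] at hpiece
    exact go_pieces_not_mem _ _ _ _ (Nat.le_succ _) (by simp) (by simp) piece hpiece
  simp only [Bool.not_eq_true]
  exact (PySem.Chars.isIn_eq_false_iff _ _).2 (fun hinf => hfree (hinf.subset hc))

-- A's per-func test: some line of snip contains f'{func}('
lemma line_test_eq (snip func : String) :
    ((PySem.Chars.splitOn snip.toList ['\n']).any
        (fun line => PySem.Chars.isIn (func.toList ++ ['(']) line))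
      = (!PySem.Chars.isIn ['\n'] func.toList
          && PySem.Chars.isIn (func.toList ++ ['(']) snip.toList) := by
  by_cases hm : '\n' ∈ func.toList
  · have hpat : '\n' ∈ func.toList ++ ['('] := List.mem_append_left _ hm
    rw [any_isIn_splitOn_of_mem hpat]
    have : PySem.Chars.isIn ['\n'] func.toList = true :=
      (PySem.Chars.isIn_iff_infix _ _).2 (by
        rcases List.append_of_mem hm with ⟨u, v, huv⟩
        exact ⟨u, v, by rw [huv]; simp⟩)
    simp [this]
  · have hpat : '\n' ∉ func.toList ++ ['('] := by
      intro h
      rcases List.mem_append.1 h with h | h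
      · exact hm h
      · simp at h
    rw [any_isIn_splitOn hpat]
    have : PySem.Chars.isIn ['\n'] func.toList = false :=
      (PySem.Chars.isIn_eq_false_iff _ _).2 (fun hinf => hm (hinf.subset (by simp)))
    simp [this]

-- A's per-func test ↔ the positional characterisation B's scan computes
lemma line_test_iff_pos (snip func : String) :
    ((PySem.Chars.splitOn snip.toList ['\n']).any
        (fun line => PySem.Chars.isIn (func.toList ++ ['(']) line)) = true
      ↔ ∃ u v, snip.toList = u ++ '(' :: v ∧ func.toList <:+ lineAcc [] u := by
  rw [line_test_eq]
  constructor
  · intro h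
    have h1 : PySem.Chars.isIn ['\n'] func.toList = false := by
      cases hh : PySem.Chars.isIn ['\n'] func.toList <;> simp [hh] at h ⊢
    have h2 : PySem.Chars.isIn (func.toList ++ ['(']) snip.toList = true := by
      cases hh : PySem.Chars.isIn (func.toList ++ ['(']) snip.toList <;> simp [hh] at h ⊢
    have hnl : '\n' ∉ func.toList := by
      intro hm
      have : PySem.Chars.isIn ['\n'] func.toList = true :=
        (PySem.Chars.isIn_iff_infix _ _).2 (by
          rcases List.append_of_mem hm with ⟨u, v, huv⟩
          exact ⟨u, v, by rw [huv]; simp⟩)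
      rw [this] at h1; cases h1
    rcases (PySem.Chars.isIn_iff_infix _ _).1 h2 with ⟨a, b, hab⟩
    refine ⟨a ++ func.toList, b, by rw [← hab]; simp, ?_⟩
    rw [lineAcc_append, lineAcc_no_newline _ _ hnl]
    exact List.suffix_append _ _
  · rintro ⟨u, v, huv, hsuf⟩
    have hnlL : '\n' ∉ lineAcc [] u := newline_not_mem_lineAcc (by simp) u
    have hnl : '\n' ∉ func.toList := fun hm => hnlL (hsuf.subset hm)
    have h1 : PySem.Chars.isIn ['\n'] func.toList = false :=
      (PySem.Chars.isIn_eq_false_iff _ _).2 (fun hinf => hnl (hinf.subset (by simp)))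
    have hsufu : func.toList <:+ u := hsuf.trans (by simpa using lineAcc_suffix [] u)
    rcases hsufu with ⟨w, rfl⟩
    have h2 : PySem.Chars.isIn (func.toList ++ ['(']) snip.toList = true :=
      (PySem.Chars.isIn_iff_infix _ _).2 ⟨w, v, by rw [huv]; simp⟩
    simp [h1, h2]

-- ===== fold-shape lemmas for A's outer loops =====

lemma inner_fold_eq (q : String → Bool) (k : String) :
    ∀ (vs : List String) (hs : PySem.Set String),
      vs.foldl (fun hs func => if q func then PySem.Set.add hs k else hs) hs
        = (if vs.any q then PySem.Set.add hs k else hs) := by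
  intro vs
  induction vs with
  | nil => intro hs; simp
  | cons f rest ih =>
    intro hs
    by_cases hf : q f
    · simp only [List.foldl_cons, hf, if_true, ih, List.any_cons]
      by_cases hr : rest.any q
      · simp [hr, PySem.Set.add_of_mem, PySem.Set.mem_add]
      · simp [hr]
    · simp [List.foldl_cons, hf, ih]

lemma outer_fold_eq (P : String → Bool) :
    ∀ (l : List String) (hs : PySem.Set String), l.Nodup → (∀ k ∈ l, k ∉ hs) →
      l.foldl (fun hs k => if P k then PySem.Set.add hs k else hs) hs = hs ++ l.filter P := by
  intro l
  induction l with
  | nil => intro hs _ _; simp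
  | cons k rest ih =>
    intro hs hnd hfresh
    by_cases hk : P k
    · simp only [List.foldl_cons]
      rw [if_pos hk]
      rw [PySem.Set.add_of_not_mem (hfresh k List.mem_cons_self)]
      rw [ih (hs ++ [k]) (List.nodup_cons.1 hnd).2 ?_]
      · simp [hk]
      · intro j hj hmem
        rcases List.mem_append.1 hmem with h | h
        · exact hfresh j (List.mem_cons_of_mem _ hj) h
        · have hjk : j = k := by simpa using h
          exact (List.nodup_cons.1 hnd).1 (hjk ▸ hj)
    · simp only [List.foldl_cons]
      rw [if_neg hk]
      rw [ih hs (List.nodup_cons.1 hnd).2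
        (fun j hj => hfresh j (List.mem_cons_of_mem _ hj))]
      simp [hk]

lemma any_congr_mem {α : Type} (l : List α) (p q : α → Bool)
    (h : ∀ x ∈ l, p x = q x) : l.any p = l.any q := by
  induction l with
  | nil => rfl
  | cons a l ih =>
    simp only [List.any_cons, h a List.mem_cons_self,
      ih (fun x hx => h x (List.mem_cons_of_mem _ hx))]

-- the whole equivalence, with the dictionary abstracted
lemma main_eq (snip : String) (d : PySem.Dict String (List String))
    (hnd : d.keys.Nodup) :
    d.keys.foldl (fun (headers : PySem.Set String) header =>
      (d.getD header []).foldl (fun (headers : PySem.Set String) func =>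
        if (PySem.Chars.splitOn snip.toList ['\n']).any
            (fun line => PySem.Chars.isIn (func.toList ++ ['(']) line) then
          PySem.Set.add headers header
        else headers) headers) PySem.Set.empty
    = PySem.Set.ofList ((d.items.filter (fun p => p.2.any (fun f =>
        PySem.Set.contains
          ((snip.toList.foldl (bScanStep (d.values.flatMap (fun fs => fs)))
            ([], PySem.Set.empty)).2) f))).map Prod.fst) := by
  set funcs := d.values.flatMap (fun fs => fs) with hfuncs
  set matched := (snip.toList.foldl (bScanStep funcs) ([], PySem.Set.empty)).2 with hmatched
  set condA : String → Bool := fun func =>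
    (PySem.Chars.splitOn snip.toList ['\n']).any
      (fun line => PySem.Chars.isIn (func.toList ++ ['(']) line) with hcondA
  -- B's test agrees with A's for every function that occurs in the dict's values
  have hagree : ∀ f ∈ funcs, PySem.Set.contains matched f = condA f := by
    intro f hf
    have hmem : f ∈ matched ↔ condA f = true := by
      rw [hmatched, scan_mem]
      constructor
      · rintro (hm | ⟨_, hpos⟩)
        · simp [PySem.Set.empty] at hm
        · exact (line_test_iff_pos snip f).2 hpos
      · intro h
        exact Or.inr ⟨hf, (line_test_iff_pos snip f).1 h⟩
    rw [Bool.eq_iff_iff]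
    rw [show (PySem.Set.contains matched f = true ↔ f ∈ matched) by simp [PySem.Set.contains]]
    exact hmem
  -- reduce A to keys.filter
  have hA : d.keys.foldl (fun (headers : PySem.Set String) header =>
      (d.getD header []).foldl (fun (headers : PySem.Set String) func =>
        if condA func then PySem.Set.add headers header else headers) headers) PySem.Set.empty
      = d.keys.filter (fun k => (d.getD k []).any condA) := by
    have := PySem.List.foldl_congr_mem (l := d.keys)
      (f := fun (headers : PySem.Set String) header =>
        (d.getD header []).foldl (fun (headers : PySem.Set String) func =>
          if condA func then PySem.Set.add headers header else headers) headers)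
      (g := fun (headers : PySem.Set String) header =>
        if (d.getD header []).any condA then PySem.Set.add headers header else headers)
      (init := PySem.Set.empty)
      (h := fun hs k _ => inner_fold_eq condA k (d.getD k []) hs)
    rw [this, outer_fold_eq _ _ _ hnd (by simp [PySem.Set.empty])]
    simp [PySem.Set.empty]
  rw [hA]
  -- reduce B to keys.filter
  have hvals : ∀ k ∈ d.keys, ∀ f ∈ d.getD k [], f ∈ funcs := by
    intro k hk f hf
    rw [hfuncs, List.mem_flatMap]
    refine ⟨d.getD k [], ?_, hf⟩
    rw [PySem.Dict.values_eq_map_keys d hnd []]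
    exact List.mem_map_of_mem hk
  rw [PySem.Dict.items_eq_map_keys d hnd [], List.filter_map, List.map_map]
  rw [show ((d.keys.filter ((fun p : String × List String =>
        p.2.any (fun f => PySem.Set.contains matched f))
        ∘ fun k => (k, d.getD k []))).map (Prod.fst ∘ fun k => (k, d.getD k [])))
      = d.keys.filter (fun k => (d.getD k []).any (fun f => PySem.Set.contains matched f)) by
    simp [Function.comp_def]]
  rw [PySem.Set.ofList_eq_self_of_nodup _ (List.Nodup.filter _ hnd)]
  refine List.filter_congr ?_
  intro k hk
  exact (any_congr_mem _ _ _ (fun f hf => hagree f (hvals k hk f hf))).symm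

-- ===== VERDICT (by name: the statement is the Claim_ definition above) =====
theorem required_headers_spec : Claim_equal_required_headers := by
  intro snip syms _
  show required_headers snip syms = required_headers_alt snip syms
  exact main_eq snip (PySem.Dict.ofList syms) (PySem.Dict.nodup_keys_ofList syms)
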